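-- pv_equiv track=rewrite | github.com/ELAI-Dev-Works/ELAI-DevKit | apps/dev_patcher/core/commands/manage/execute/utils.py | reconstruct_paths
-- ===== SOURCE A (Python) =====
-- from typing import List, Tuple
--
-- def reconstruct_paths(args: List[str]) -> List[str]:
--     """
--     Reconstructs arguments that were split by spaces inside quotes.
--     Example:['-move', '"path/to', 'my', 'file"'] ->['-move', 'path/to my file']
--     """
--     new_args =[]
--     i = 0
--     while i < len(args):
--         arg = args[i]
--         # Case 1: Start of a multi-word quoted path (starts with ", but doesn't end with one)
--         if arg.startswith('"') and not (len(arg) > 1 and arg.endswith('"')):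
--             reconstructed_path_parts = [arg[1:]]  # Remove starting quote
--             i += 1
--             # Consume subsequent parts until one ends with a quote
--             while i < len(args):
--                 part = args[i]
--                 if part.endswith('"'):
--                     reconstructed_path_parts.append(part[:-1])  # Remove ending quote and append
--                     i += 1
--                     break
--                 else:
--                     reconstructed_path_parts.append(part)
--                     i += 1
--             new_args.append(" ".join(reconstructed_path_parts))
--         # Case 2: A single, self-contained quoted path
--         elif arg.startswith('"') and arg.endswith('"'):
--             new_args.append(arg[1:-1])
--             i += 1
--         # Case 3: A normal, unquoted argument
--         else:
--             new_args.append(arg)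
--             i += 1
--     return new_args
-- ===== SOURCE B (Python) =====
-- def reconstruct_paths(args):
--     """
--     Reconstructs arguments that were split by spaces inside quotes.
--     Single linear pass with a `buffer` state (None outside a quoted path).
--     """
--     new_args = []
--     buffer = None
--     for arg in args:
--         if buffer is not None:
--             if arg.endswith('"'):
--                 buffer.append(arg[:-1])
--                 new_args.append(" ".join(buffer))
--                 buffer = None
--             else:
--                 buffer.append(arg)
--         elif arg.startswith('"') and not (len(arg) > 1 and arg.endswith('"')):
--             buffer = [arg[1:]]
--         elif arg.startswith('"') and arg.endswith('"'):
--             new_args.append(arg[1:-1])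
--         else:
--             new_args.append(arg)
--     if buffer is not None:
--         new_args.append(" ".join(buffer))
--     return new_args
-- ===== Notes on version B (the rewrite author's own statement) =====
-- stated objective: simpler
-- what changed: Replaced A's index-driven outer while loop with a nested inner while (manual i bookkeeping and repeated len/indexing) by a single for-loop fold carrying an Option buffer state that is flushed when a closing quote (or the end of input) is reached.
import Mathlib
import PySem

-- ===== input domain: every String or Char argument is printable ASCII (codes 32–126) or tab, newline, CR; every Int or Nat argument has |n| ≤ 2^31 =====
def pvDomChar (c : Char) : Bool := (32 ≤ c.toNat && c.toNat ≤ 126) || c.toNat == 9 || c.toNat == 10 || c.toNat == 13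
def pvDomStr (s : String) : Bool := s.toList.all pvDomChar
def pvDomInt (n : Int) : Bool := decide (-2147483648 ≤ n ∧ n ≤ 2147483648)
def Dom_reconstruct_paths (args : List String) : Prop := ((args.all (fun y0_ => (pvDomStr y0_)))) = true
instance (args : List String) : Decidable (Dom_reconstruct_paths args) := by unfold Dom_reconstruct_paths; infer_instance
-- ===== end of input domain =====

-- B replaces A's index-driven outer/inner while loops by one fold with an Option buffer state; objective: simpler.

-- ===== PORT A =====
-- inner while loop of A: consume parts until one ends with '"'; returns (collected parts, remaining args)
def pvConsume : List String → List String × List String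
  | [] => ([], [])
  | p :: rest =>
    if PySem.Str.endswith p "\"" then ([PySem.Str.slice p none (some (-1))], rest)
    else
      let r := pvConsume rest
      (p :: r.1, r.2)

theorem pvConsume_len : ∀ l : List String, (pvConsume l).2.length ≤ l.length := by
  intro l
  induction l with
  | nil => simp [pvConsume]
  | cons p rest ih =>
    simp only [pvConsume]
    split
    · simp
    · simpa using Nat.le_succ_of_le ih

def reconstruct_paths : List String → List String
  | [] => []
  | arg :: rest =>
    if PySem.Str.startswith arg "\"" = true ∧
        ¬(1 < PySem.Str.len arg ∧ PySem.Str.endswith arg "\"" = true) then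
      let c := pvConsume rest
      PySem.Str.join " " (PySem.Str.slice arg (some 1) none :: c.1) :: reconstruct_paths c.2
    else if PySem.Str.startswith arg "\"" = true ∧ PySem.Str.endswith arg "\"" = true then
      PySem.Str.slice arg (some 1) (some (-1)) :: reconstruct_paths rest
    else
      arg :: reconstruct_paths rest
termination_by args => args.length
decreasing_by
  · exact Nat.lt_succ_of_le (pvConsume_len rest)
  · simp
  · simp

-- ===== PORT B =====
-- one step of B's for loop; state = (output so far, buffer: none outside a quoted path)
def pvStep (st : List String × Option (List String)) (arg : String) :
    List String × Option (List String) :=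
  match st.2 with
  | some parts =>
    if PySem.Str.endswith arg "\"" = true then
      (st.1 ++ [PySem.Str.join " " (parts ++ [PySem.Str.slice arg none (some (-1))])], none)
    else
      (st.1, some (parts ++ [arg]))
  | none =>
    if PySem.Str.startswith arg "\"" = true ∧
        ¬(1 < PySem.Str.len arg ∧ PySem.Str.endswith arg "\"" = true) then
      (st.1, some [PySem.Str.slice arg (some 1) none])
    else if PySem.Str.startswith arg "\"" = true ∧ PySem.Str.endswith arg "\"" = true then
      (st.1 ++ [PySem.Str.slice arg (some 1) (some (-1))], none)
    else
      (st.1 ++ [arg], none)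

def reconstruct_paths_alt (args : List String) : List String :=
  let st := args.foldl pvStep ([], none)
  match st.2 with
  | some parts => st.1 ++ [PySem.Str.join " " parts]
  | none => st.1

-- ===== PRECONDITION & SPEC =====
def Spec_reconstruct_paths (args : List String) (out : List String) : Prop := out = reconstruct_paths_alt args
instance (args : List String) (out : List String) : Decidable (Spec_reconstruct_paths args out) := by unfold Spec_reconstruct_paths; infer_instance

-- ===== CLAIM (what is proved, stated in full; the proofs are below) =====
def Claim_equal_reconstruct_paths : Prop := ∀ (args : List String), Dom_reconstruct_paths args → Spec_reconstruct_paths args (reconstruct_paths args)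

-- ===== LEMMAS AND PROOFS =====

-- flush B's final state into the result list
def pvFinish (st : List String × Option (List String)) : List String :=
  match st.2 with
  | some parts => st.1 ++ [PySem.Str.join " " parts]
  | none => st.1

theorem pvMainAux : ∀ (n : ℕ) (args : List String), args.length ≤ n →
    (∀ acc : List String, pvFinish (args.foldl pvStep (acc, none)) = acc ++ reconstruct_paths args) ∧
    (∀ acc parts : List String,
      pvFinish (args.foldl pvStep (acc, some parts)) =
        acc ++ PySem.Str.join " " (parts ++ (pvConsume args).1) :: reconstruct_paths (pvConsume args).2) := by
  intro n
  induction n with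
  | zero =>
    intro args h
    have : args = [] := List.eq_nil_of_length_eq_zero (Nat.le_zero.mp h)
    subst this
    constructor
    · intro acc; simp [pvFinish, reconstruct_paths]
    · intro acc parts; simp [pvFinish, pvConsume, reconstruct_paths]
  | succ n ih =>
    intro args h
    cases args with
    | nil =>
      constructor
      · intro acc; simp [pvFinish, reconstruct_paths]
      · intro acc parts; simp [pvFinish, pvConsume, reconstruct_paths]
    | cons arg rest =>
      have hr : rest.length ≤ n := by simpa using Nat.lt_succ_iff.mp (Nat.lt_of_lt_of_le (by simp) h)
      constructor
      · intro acc
        rw [reconstruct_paths]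
        by_cases h1 : PySem.Str.startswith arg "\"" = true ∧
            ¬(1 < PySem.Str.len arg ∧ PySem.Str.endswith arg "\"" = true)
        · rw [if_pos h1]
          rw [List.foldl_cons,
            show pvStep (acc, none) arg = (acc, some [PySem.Str.slice arg (some 1) none]) from by
              simp only [pvStep]; rw [if_pos h1]]
          rw [(ih rest hr).2 acc [PySem.Str.slice arg (some 1) none]]
          simp
        · rw [if_neg h1]
          by_cases h2 : PySem.Str.startswith arg "\"" = true ∧ PySem.Str.endswith arg "\"" = true
          · rw [if_pos h2]
            rw [List.foldl_cons,
              show pvStep (acc, none) arg =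
                  (acc ++ [PySem.Str.slice arg (some 1) (some (-1))], none) from by
                simp only [pvStep]; rw [if_neg h1, if_pos h2]]
            rw [(ih rest hr).1 (acc ++ [PySem.Str.slice arg (some 1) (some (-1))])]
            simp
          · rw [if_neg h2]
            rw [List.foldl_cons,
              show pvStep (acc, none) arg = (acc ++ [arg], none) from by
                simp only [pvStep]; rw [if_neg h1, if_neg h2]]
            rw [(ih rest hr).1 (acc ++ [arg])]
            simp
      · intro acc parts
        by_cases h1 : PySem.Str.endswith arg "\"" = true
        · rw [List.foldl_cons,
            show pvStep (acc, some parts) arg =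
                (acc ++ [PySem.Str.join " " (parts ++ [PySem.Str.slice arg none (some (-1))])],
                  none) from by simp only [pvStep]; rw [if_pos h1]]
          rw [(ih rest hr).1
            (acc ++ [PySem.Str.join " " (parts ++ [PySem.Str.slice arg none (some (-1))])])]
          rw [show pvConsume (arg :: rest) = ([PySem.Str.slice arg none (some (-1))], rest) from by
            simp only [pvConsume]; rw [if_pos h1]]
          simp
        · rw [List.foldl_cons,
            show pvStep (acc, some parts) arg = (acc, some (parts ++ [arg])) from by
              simp only [pvStep]; rw [if_neg h1]]
          rw [(ih rest hr).2 acc (parts ++ [arg])]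
          rw [show pvConsume (arg :: rest) =
              ((arg :: (pvConsume rest).1), (pvConsume rest).2) from by
            simp only [pvConsume]; rw [if_neg h1]]
          simp

-- ===== VERDICT (by name: the statement is the Claim_ definition above) =====
theorem reconstruct_paths_spec : Claim_equal_reconstruct_paths := by
  intro args _
  unfold Spec_reconstruct_paths reconstruct_paths_alt
  have := (pvMainAux args.length args le_rfl).1 []
  simpa [pvFinish] using this.symm
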